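-- pv_equiv track=rewrite | github.com/Artin-khodayari/DAMAVAND-lang | ide.py | _find_comment_spans
-- ===== SOURCE A (Python) =====
-- def _find_comment_spans(text, string_spans):
--     # Build quick mask for "inside-string"
--     in_string = [False] * (len(text) + 1)
--     for s, e in string_spans:
--         for k in range(s, e):
--             if 0 <= k < len(in_string):
--                 in_string[k] = True
--
--     spans = []
--     i, n = 0, len(text)
--     while i < n:
--         if text[i] == "#" and not in_string[i]:
--             # comment runs to end of line
--             j = i
--             while j < n and text[j] != "\n":
--                 j += 1
--             spans.append((i, j))
--             i = j
--         else:
--             i += 1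
--     return spans
-- ===== SOURCE B (Python) =====
-- def _find_comment_spans(text, string_spans):
--     n = len(text)
--     spans = []
--     pos = 0
--     while True:
--         idx = text.find('#', pos)
--         if idx == -1:
--             return spans
--         if any(s <= idx < e for s, e in string_spans):
--             pos = idx + 1
--         else:
--             j = text.find('\n', idx)
--             if j == -1:
--                 j = n
--             spans.append((idx, j))
--             pos = j
-- ===== Notes on version B (the rewrite author's own statement) =====
-- stated objective: faster
-- what changed: B drops A's boolean in-string mask and full per-character scan: it jumps between '#' occurrences with str.find, tests each hit directly against the span list, and locates line ends with str.find('\n', idx).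
import Mathlib
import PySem

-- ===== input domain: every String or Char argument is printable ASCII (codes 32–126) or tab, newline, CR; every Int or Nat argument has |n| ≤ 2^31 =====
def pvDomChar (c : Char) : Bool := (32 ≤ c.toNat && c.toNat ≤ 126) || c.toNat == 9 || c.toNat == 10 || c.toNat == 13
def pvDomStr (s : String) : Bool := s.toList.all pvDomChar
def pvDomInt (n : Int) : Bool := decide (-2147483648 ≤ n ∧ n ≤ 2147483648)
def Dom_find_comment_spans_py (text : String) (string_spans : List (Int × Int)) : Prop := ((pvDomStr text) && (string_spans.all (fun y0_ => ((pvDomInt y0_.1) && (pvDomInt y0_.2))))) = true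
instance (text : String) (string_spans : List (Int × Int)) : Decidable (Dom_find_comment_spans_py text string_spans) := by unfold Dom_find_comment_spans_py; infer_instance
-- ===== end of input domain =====

-- B replaces A's boolean in-string mask and char-by-char scan with find-driven jumps
-- between '#' occurrences plus a direct span-membership test (objective: simpler).
-- ===== PORT A =====
-- `for k in range(s, e): if 0 <= k < len(in_string): in_string[k] = True`
def pvMark (mask : List Bool) (se : Int × Int) : List Bool :=
  (PySem.List.pyRange se.1 se.2 1).foldl
    (fun m k => if 0 ≤ k ∧ k < (m.length : Int) then m.set k.toNat true else m) mask

-- inner `while j < n and text[j] != "\n": j += 1` (termination helpers below it)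
def pvFindEolA (cs : List Char) (n j : Nat) : Nat :=
  if j < n ∧ cs[j]! ≠ '\n' then pvFindEolA cs n (j+1) else j
termination_by n - j
decreasing_by omega

theorem pvFindEolA_le (cs : List Char) (n j : Nat) : j ≤ pvFindEolA cs n j := by
  fun_induction pvFindEolA <;> omega

theorem pvFindEolA_step (cs : List Char) (n j : Nat) (h : j < n) (hne : cs[j]! ≠ '\n') :
    pvFindEolA cs n j = pvFindEolA cs n (j+1) := by
  rw [pvFindEolA, if_pos ⟨h, hne⟩]

-- outer `while i < n` loop of A (j inlined)
def pvScanA (cs : List Char) (mask : List Bool) (n i : Nat) : List (Int × Int) :=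
  if h : i < n then
    if hc : cs[i]! = '#' ∧ ¬ mask[i]! then
      ((i : Int), ((pvFindEolA cs n i : Nat) : Int)) :: pvScanA cs mask n (pvFindEolA cs n i)
    else pvScanA cs mask n (i+1)
  else []
termination_by n - i
decreasing_by
  · have h1 : i + 1 ≤ pvFindEolA cs n (i+1) := pvFindEolA_le cs n (i+1)
    have h2 : pvFindEolA cs n i = pvFindEolA cs n (i+1) :=
      pvFindEolA_step cs n i h (by rw [hc.1]; decide)
    omega
  · omega

def find_comment_spans_py (text : String) (string_spans : List (Int × Int)) : List (Int × Int) :=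
  let cs := text.toList
  let in_string := string_spans.foldl pvMark (List.replicate (cs.length + 1) false)
  pvScanA cs in_string cs.length 0

-- ===== PORT B =====
-- `text.find(c, pos)`; `none` encodes Python's -1
def pvFindCharB (cs : List Char) (c : Char) (n pos : Nat) : Option Nat :=
  if pos < n then (if cs[pos]! = c then some pos else pvFindCharB cs c n (pos+1)) else none
termination_by n - pos
decreasing_by omega

theorem pvFindCharB_none (cs : List Char) (c : Char) (n pos : Nat) (h : ¬ pos < n) :
    pvFindCharB cs c n pos = none := by
  rw [pvFindCharB, if_neg h]

theorem pvFindCharB_self (cs : List Char) (c : Char) (n pos : Nat) (h : pos < n)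
    (he : cs[pos]! = c) : pvFindCharB cs c n pos = some pos := by
  rw [pvFindCharB, if_pos h, if_pos he]

theorem pvFindCharB_step (cs : List Char) (c : Char) (n pos : Nat) (h : pos < n)
    (hne : cs[pos]! ≠ c) : pvFindCharB cs c n pos = pvFindCharB cs c n (pos+1) := by
  rw [pvFindCharB, if_pos h, if_neg hne]

theorem pvFindCharB_bounds (cs : List Char) (c : Char) (n : Nat) :
    ∀ pos idx, pvFindCharB cs c n pos = some idx → pos ≤ idx ∧ idx < n ∧ cs[idx]! = c := by
  intro pos
  induction hfu : n - pos using Nat.strong_induction_on generalizing pos with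
  | _ fu ih =>
    subst hfu
    intro idx h
    by_cases hp : pos < n
    · by_cases hc : cs[pos]! = c
      · rw [pvFindCharB_self cs c n pos hp hc] at h
        injection h with h; subst h; exact ⟨le_rfl, hp, hc⟩
      · rw [pvFindCharB_step cs c n pos hp hc] at h
        have := ih (n - (pos+1)) (by omega) (pos+1) rfl idx h
        exact ⟨by omega, this.2⟩
    · rw [pvFindCharB_none cs c n pos hp] at h; cases h

-- B's `while True` loop with find-driven jumps (j inlined)
def pvJumpB (cs : List Char) (spans : List (Int × Int)) (n pos : Nat) : List (Int × Int) :=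
  match hm : pvFindCharB cs '#' n pos with
  | none => []
  | some idx =>
    if spans.any (fun se => decide (se.1 ≤ (idx : Int) ∧ (idx : Int) < se.2)) then
      pvJumpB cs spans n (idx+1)
    else
      ((idx : Int), (((pvFindCharB cs '\n' n idx).getD n : Nat) : Int)) ::
        pvJumpB cs spans n ((pvFindCharB cs '\n' n idx).getD n)
termination_by n - pos
decreasing_by
  · have := pvFindCharB_bounds cs '#' n pos idx hm
    omega
  · have hb := pvFindCharB_bounds cs '#' n pos idx hm
    have hne : cs[idx]! ≠ '\n' := by rw [hb.2.2]; decide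
    have hstep := pvFindCharB_step cs '\n' n idx hb.2.1 hne
    cases hnl : pvFindCharB cs '\n' n (idx+1) with
    | none => simp [hstep, hnl]; omega
    | some j' =>
      have := pvFindCharB_bounds cs '\n' n (idx+1) j' hnl
      simp [hstep, hnl]; omega

def find_comment_spans_py_alt (text : String) (string_spans : List (Int × Int)) : List (Int × Int) :=
  let cs := text.toList
  pvJumpB cs string_spans cs.length 0

-- ===== PRECONDITION & SPEC =====
def Spec_find_comment_spans_py (text : String) (string_spans : List (Int × Int)) (out : List (Int × Int)) : Prop := out = find_comment_spans_py_alt text string_spans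
instance (text : String) (string_spans : List (Int × Int)) (out : List (Int × Int)) : Decidable (Spec_find_comment_spans_py text string_spans out) := by unfold Spec_find_comment_spans_py; infer_instance

-- ===== CLAIM (what is proved, stated in full; the proofs are below) =====
def Claim_equal_find_comment_spans_py : Prop := ∀ (text : String) (string_spans : List (Int × Int)), Dom_find_comment_spans_py text string_spans → Spec_find_comment_spans_py text string_spans (find_comment_spans_py text string_spans)

-- ===== LEMMAS AND PROOFS =====

theorem pvMark_length (mask : List Bool) (se : Int × Int) :
    (pvMark mask se).length = mask.length := by
  unfold pvMark
  generalize PySem.List.pyRange se.1 se.2 1 = l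
  induction l generalizing mask with
  | nil => rfl
  | cons k l ih =>
    simp only [List.foldl_cons]
    split
    · rw [ih]; simp
    · rw [ih]

theorem pvMark_get (mask : List Bool) (se : Int × Int) (i : Nat) (hi : i < mask.length) :
    (pvMark mask se)[i]! = (mask[i]! || decide (se.1 ≤ (i : Int) ∧ (i : Int) < se.2)) := by
  rw [show (decide (se.1 ≤ (i : Int) ∧ (i : Int) < se.2)) =
      decide ((i : Int) ∈ PySem.List.pyRange se.1 se.2 1) by
    simp [PySem.List.mem_pyRange_one]]
  unfold pvMark
  generalize PySem.List.pyRange se.1 se.2 1 = l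
  induction l generalizing mask with
  | nil => simp
  | cons k l ih =>
    simp only [List.foldl_cons, List.mem_cons]
    by_cases hk : 0 ≤ k ∧ k < (mask.length : Int)
    · rw [if_pos hk, ih _ (by simpa using hi)]
      by_cases hki : k = (i : Int)
      · subst hki
        have h1 : (mask.set ((i : Int)).toNat true)[i]! = true := by
          simp [hi]
        rw [h1]; simp
      · have hne : k.toNat ≠ i := by omega
        have h1 : (mask.set k.toNat true)[i]! = mask[i]! := by
          simp [List.getElem!_eq_getElem?_getD, List.getElem?_set_ne hne]
        rw [h1]
        have hki' : ¬ ((i : Int) = k) := fun h => hki h.symm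
        simp [hki']
    · rw [if_neg hk, ih mask hi]
      have hki : ¬ ((i : Int) = k) := by intro h; exact hk ⟨by omega, by omega⟩
      simp [hki]

theorem pvMask_get (spans : List (Int × Int)) (mask : List Bool) (i : Nat)
    (hi : i < mask.length) :
    (spans.foldl pvMark mask)[i]! =
      (mask[i]! || spans.any (fun se => decide (se.1 ≤ (i : Int) ∧ (i : Int) < se.2))) := by
  induction spans generalizing mask with
  | nil => simp
  | cons se spans ih =>
    simp only [List.foldl_cons, List.any_cons]
    rw [ih _ (by rw [pvMark_length]; exact hi), pvMark_get mask se i hi]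
    cases mask[i]! <;> simp

-- A's line-end while loop computes the same index as B's text.find('\n', idx) (with -1 ↦ n)
theorem pvEol_eq (cs : List Char) (n : Nat) :
    ∀ j, j ≤ n → pvFindEolA cs n j = (pvFindCharB cs '\n' n j).getD n := by
  intro j
  induction hfu : n - j using Nat.strong_induction_on generalizing j with
  | _ fu ih =>
    subst hfu
    intro hj
    by_cases hlt : j < n
    · by_cases hc : cs[j]! = '\n'
      · rw [pvFindCharB_self cs '\n' n j hlt hc, pvFindEolA, if_neg (fun h => h.2 hc)]; rfl
      · rw [pvFindEolA_step cs n j hlt hc, pvFindCharB_step cs '\n' n j hlt hc,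
            ih (n - (j+1)) (by omega) (j+1) rfl (by omega)]
    · rw [pvFindCharB_none cs '\n' n j hlt, pvFindEolA, if_neg (fun h => hlt h.1)]
      simp; omega

theorem pvJumpB_step (cs : List Char) (spans : List (Int × Int)) (n i : Nat)
    (hi : i < n) (hne : cs[i]! ≠ '#') :
    pvJumpB cs spans n i = pvJumpB cs spans n (i+1) := by
  rw [pvJumpB, pvJumpB, pvFindCharB_step cs '#' n i hi hne]

-- core loop equivalence: A's scan equals B's jumps given the mask agrees with the span test
theorem pvScan_eq_jump (cs : List Char) (spans : List (Int × Int)) (mask : List Bool)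
    (n : Nat)
    (hmask : ∀ k : Nat, k < n →
      mask[k]! = spans.any (fun se => decide (se.1 ≤ (k : Int) ∧ (k : Int) < se.2)))
    (i : Nat) : pvScanA cs mask n i = pvJumpB cs spans n i := by
  induction hfu : n - i using Nat.strong_induction_on generalizing i with
  | _ fu ih =>
  subst hfu
  rw [pvScanA]
  by_cases hi : i < n
  · rw [dif_pos hi]
    by_cases hh : cs[i]! = '#'
    · have hfind : pvFindCharB cs '#' n i = some i := pvFindCharB_self cs '#' n i hi hh
      by_cases hin : spans.any (fun se => decide (se.1 ≤ (i : Int) ∧ (i : Int) < se.2))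
      · rw [dif_neg (fun h => h.2 (by rw [hmask i hi]; exact hin))]
        rw [pvJumpB]
        split
        next heq => rw [hfind] at heq; cases heq
        next idx heq =>
          rw [hfind] at heq; injection heq with heq; subst heq
          rw [if_pos hin]
          exact ih (n - (i+1)) (by omega) (i+1) rfl
      · rw [dif_pos ⟨hh, by rw [hmask i hi]; exact hin⟩]
        rw [pvJumpB]
        split
        next heq => rw [hfind] at heq; cases heq
        next idx heq =>
          rw [hfind] at heq; injection heq with heq; subst heq
          rw [if_neg hin]
          have hEol := pvEol_eq cs n i (by omega)
          have hgt : i < pvFindEolA cs n i := by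
            have h1 := pvFindEolA_le cs n (i+1)
            have h2 := pvFindEolA_step cs n i hi (by rw [hh]; decide)
            omega
          rw [← hEol, ih (n - pvFindEolA cs n i) (by omega) (pvFindEolA cs n i) rfl]
    · rw [dif_neg (fun h => hh h.1)]
      rw [ih (n - (i+1)) (by omega) (i+1) rfl]
      exact (pvJumpB_step cs spans n i hi hh).symm
  · rw [dif_neg hi, pvJumpB, pvFindCharB_none cs '#' n i hi]

-- ===== VERDICT (by name: the statement is the Claim_ definition above) =====
theorem find_comment_spans_py_spec : Claim_equal_find_comment_spans_py := by
  intro text spans _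
  unfold Spec_find_comment_spans_py find_comment_spans_py find_comment_spans_py_alt
  apply pvScan_eq_jump
  intro k hk
  rw [pvMask_get spans _ k (by rw [List.length_replicate]; omega)]
  have hk2 : k ≤ text.length := by
    have h : text.toList.length = text.length := by simp
    omega
  simp [hk2]
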